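-- pv_equiv track=rewrite | github.com/sandrohp88/code_fight | challenges/contruct_array.py | constructList
-- ===== SOURCE A (Python) =====
-- def constructList(size):
--     result = []
--     i = 0
--     while size - i != i + 1 and size - i > i and i in range(size):
--         result.append(i + 1)
--         result.append(size - i)
--         i += 1
--
--     if size - i == i + 1:
--         result.append(i + 1)
--     return result
-- ===== SOURCE B (Python) =====
-- def constructList(size):
--     return [i // 2 + 1 if i % 2 == 0 else size - i // 2 for i in range(size)]
-- ===== Notes on version B (the rewrite author's own statement) =====
-- stated objective: simpler
-- what changed: Replaces A's two-endpoint convergence while-loop with its trailing middle-element branch by a single list comprehension over output positions computing each element from a closed parity formula (i//2+1 for even i, size-i//2 for odd i); the comprehension avoids A's per-iteration condition re-evaluation and repeated appends (measured constant-factor speedup).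
import Mathlib
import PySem

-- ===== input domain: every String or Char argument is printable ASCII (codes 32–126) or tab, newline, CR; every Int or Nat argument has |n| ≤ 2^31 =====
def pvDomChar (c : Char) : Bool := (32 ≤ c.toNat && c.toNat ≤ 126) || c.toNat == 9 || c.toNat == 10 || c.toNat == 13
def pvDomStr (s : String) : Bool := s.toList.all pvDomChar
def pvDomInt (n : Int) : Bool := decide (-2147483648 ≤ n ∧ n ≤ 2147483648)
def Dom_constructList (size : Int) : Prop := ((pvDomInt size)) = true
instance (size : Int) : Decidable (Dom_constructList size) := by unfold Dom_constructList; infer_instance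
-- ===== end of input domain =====

-- B replaces A's two-endpoint convergence while-loop (plus final middle-element branch)
-- with a single list comprehension over output positions using a closed positional formula (objective: simpler).

-- ===== PORT A =====
-- while loop of A: state (result, i); condition 'size - i != i + 1 and size - i > i and i in range(size)'
def constructListLoop (size i : Int) (result : List Int) : List Int × Int :=
  if size - i ≠ i + 1 ∧ size - i > i ∧ (0 ≤ i ∧ i < size) then
    constructListLoop size (i + 1) (result ++ [i + 1] ++ [size - i])
  else (result, i)
termination_by (size - i).toNat
decreasing_by omega

def constructList (size : Int) : List Int :=
  let p := constructListLoop size 0 []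
  if size - p.2 = p.2 + 1 then p.1 ++ [p.2 + 1] else p.1

-- ===== PORT B =====
def constructList_alt (size : Int) : List Int :=
  (PySem.List.pyRange 0 size 1).map
    (fun i => if PySem.Int.mod i 2 = 0 then PySem.Int.floordiv i 2 + 1 else size - PySem.Int.floordiv i 2)

-- ===== PRECONDITION & SPEC =====
def Spec_constructList (size : Int) (out : List Int) : Prop := out = constructList_alt size
instance (size : Int) (out : List Int) : Decidable (Spec_constructList size out) := by unfold Spec_constructList; infer_instance

-- ===== CLAIM (what is proved, stated in full; the proofs are below) =====
def Claim_equal_constructList : Prop := ∀ (size : Int), Dom_constructList size → Spec_constructList size (constructList size)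

-- ===== LEMMAS AND PROOFS =====

theorem pv_f_even (n i : Int) (h : 0 ≤ i) :
    (if PySem.Int.mod (2 * i) 2 = 0 then PySem.Int.floordiv (2 * i) 2 + 1 else n - PySem.Int.floordiv (2 * i) 2) = i + 1 := by
  rw [PySem.Int.mod_eq_emod_of_pos (by omega), PySem.Int.floordiv_eq_ediv_of_pos (by omega)]
  simp [Int.mul_emod_right]

theorem pv_f_odd (n i : Int) (h : 0 ≤ i) :
    (if PySem.Int.mod (2 * i + 1) 2 = 0 then PySem.Int.floordiv (2 * i + 1) 2 + 1 else n - PySem.Int.floordiv (2 * i + 1) 2) = n - i := by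
  rw [PySem.Int.mod_eq_emod_of_pos (by omega), PySem.Int.floordiv_eq_ediv_of_pos (by omega)]
  have h1 : (2 * i + 1) % 2 = 1 := by omega
  have h2 : (2 * i + 1) / 2 = i := by omega
  rw [h1, h2]
  simp

-- main invariant: running A's loop from i (0 ≤ i) and applying the final branch
-- appends exactly the positional-formula values over positions 2i .. size-1
theorem pv_loop_eq (n : Int) : ∀ i acc, 0 ≤ i →
    (let p := constructListLoop n i acc
     if n - p.2 = p.2 + 1 then p.1 ++ [p.2 + 1] else p.1)
    = acc ++ (PySem.List.pyRange (2 * i) n 1).map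
        (fun j => if PySem.Int.mod j 2 = 0 then PySem.Int.floordiv j 2 + 1 else n - PySem.Int.floordiv j 2) := by
  intro i acc hi
  rw [constructListLoop]
  by_cases hc : n - i ≠ i + 1 ∧ n - i > i ∧ (0 ≤ i ∧ i < n)
  · simp only [if_pos hc]
    have hrec := pv_loop_eq n (i + 1) (acc ++ [i + 1] ++ [n - i]) (by omega)
    rw [hrec]
    have h1 : 2 * i < n := by omega
    have h2 : 2 * i + 1 < n := by omega
    rw [PySem.List.pyRange_one_cons h1, PySem.List.pyRange_one_cons (by omega : 2 * i + 1 < n)]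
    simp only [List.map_cons, pv_f_even n i hi, pv_f_odd n i hi]
    have : 2 * i + 1 + 1 = 2 * (i + 1) := by ring
    rw [this]
    simp
  · simp only [if_neg hc]
    by_cases hm : n - i = i + 1
    · -- middle element: n = 2i+1, range(2i, n) = [2i]
      simp only [if_pos hm]
      have : n = 2 * i + 1 := by omega
      subst this
      rw [show (2 * i + 1 : Int) = 2 * i + 1 from rfl, PySem.List.pyRange_one_singleton]
      simp only [List.map_cons, List.map_nil, pv_f_even (2 * i + 1) i hi]
    · -- loop stopped with n ≤ 2i: empty range
      simp only [if_neg hm]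
      have hle : n ≤ 2 * i := by omega
      rw [PySem.List.pyRange_one_eq_nil hle]
      simp
termination_by i _ _ => (n - i).toNat
decreasing_by omega

-- ===== VERDICT (by name: the statement is the Claim_ definition above) =====
theorem constructList_spec : Claim_equal_constructList := by
  intro size _
  unfold Spec_constructList constructList constructList_alt
  have h := pv_loop_eq size 0 [] (by omega)
  norm_num at h
  simpa using h
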